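-- pv_equiv track=rewrite | github.com/gadorcc/Algorithm2 | Codewards_Kata/Find_Cracker.py | find_hack
-- ===== SOURCE A (Python) =====
-- def find_hack(arr):
--     dict_letter = {"A":30, "B":20, "C":10, "D":5}
--     arr_result = []
--     for n in arr:
--         sum1 = 0
--         count_ab = 0
--         all_ab = True
--         for letter in n[2]:
--             if letter in dict_letter:
--                 sum1  += dict_letter[letter]
--                 if letter == 'A' or letter == 'B':
--                     count_ab += 1
--                 else:
--                     all_ab = False
--         if count_ab > 4 and all_ab == True:
--             sum1 += 20
--         if sum1 > 200:
--             sum1 = 200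
--         if n[1] != sum1:
--             arr_result.append(n[0])
--     return arr_result
-- ===== SOURCE B (Python) =====
-- def grade(s):
--     a, b, c, d = s.count('A'), s.count('B'), s.count('C'), s.count('D')
--     total = 30 * a + 20 * b + 10 * c + 5 * d
--     if a + b > 4 and c + d == 0:
--         total += 20
--     return min(total, 200)
--
--
-- def find_hack(arr):
--     return [name for name, stored, s in arr if stored != grade(s)]
-- ===== Notes on version B (the rewrite author's own statement) =====
-- stated objective: idiomatic
-- what changed: Replaces A's single-pass per-character accumulator loop (running sum, A/B counter, all_ab flag, explicit result append) with a staged declarative computation: four str.count library scans yield the letter tallies, the score is a closed arithmetic formula 30a+20b+10c+5d with bonus condition a+b>4 and c+d==0 and a min() cap, and the result list is a comprehension filtering on that score.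
import Mathlib
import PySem

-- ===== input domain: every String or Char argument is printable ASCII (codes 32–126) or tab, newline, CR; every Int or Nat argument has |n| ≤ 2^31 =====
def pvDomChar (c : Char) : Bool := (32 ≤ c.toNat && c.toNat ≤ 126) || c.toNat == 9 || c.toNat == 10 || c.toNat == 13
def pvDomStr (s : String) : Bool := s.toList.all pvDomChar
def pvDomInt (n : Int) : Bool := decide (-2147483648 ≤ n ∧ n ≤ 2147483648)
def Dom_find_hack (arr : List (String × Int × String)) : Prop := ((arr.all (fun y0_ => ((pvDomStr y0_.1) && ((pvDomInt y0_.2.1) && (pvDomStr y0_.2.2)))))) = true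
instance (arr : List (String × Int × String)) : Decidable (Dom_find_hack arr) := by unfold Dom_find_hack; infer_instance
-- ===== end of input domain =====

-- B replaces A's single-pass branchy per-character accumulator by four str.count scans, a closed
-- arithmetic score formula, and a comprehension over the records (objective: idiomatic).

-- ===== PORT A =====
-- dict_letter = {"A":30, "B":20, "C":10, "D":5} (1-char string keys, ported as Char keys)
def pvDictLetter : PySem.Dict Char Int :=
  PySem.Dict.ofList [('A', 30), ('B', 20), ('C', 10), ('D', 5)]

def find_hack (arr : List (String × Int × String)) : List String :=
  arr.foldl (fun arr_result n =>
    let st : Int × Int × Bool := n.2.2.toList.foldl (fun st letter =>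
      if pvDictLetter.contains letter then
        let sum1 := st.1 + pvDictLetter.getD letter 0   -- lookup guarded by 'letter in dict_letter'
        if letter = 'A' ∨ letter = 'B' then (sum1, st.2.1 + 1, st.2.2)
        else (sum1, st.2.1, false)
      else st) (0, 0, true)
    let sum1 := if st.2.1 > 4 ∧ st.2.2 = true then st.1 + 20 else st.1
    let sum1 := if sum1 > 200 then (200 : Int) else sum1
    if n.2.1 ≠ sum1 then arr_result ++ [n.1] else arr_result) []

-- ===== PORT B =====
def pvGrade (s : String) : Int :=
  let a : Int := PySem.Str.count s "A"
  let b : Int := PySem.Str.count s "B"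
  let c : Int := PySem.Str.count s "C"
  let d : Int := PySem.Str.count s "D"
  let total := 30 * a + 20 * b + 10 * c + 5 * d
  let total := if a + b > 4 ∧ c + d = 0 then total + 20 else total
  min total 200

-- the list comprehension '[name for name, stored, s in arr if stored != grade(s)]'
def find_hack_alt (arr : List (String × Int × String)) : List String :=
  (arr.filter (fun n => n.2.1 ≠ pvGrade n.2.2)).map (·.1)

-- ===== PRECONDITION & SPEC =====
def Spec_find_hack (arr : List (String × Int × String)) (out : List String) : Prop := out = find_hack_alt arr
instance (arr : List (String × Int × String)) (out : List String) : Decidable (Spec_find_hack arr out) := by unfold Spec_find_hack; infer_instance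

-- ===== CLAIM (what is proved, stated in full; the proofs are below) =====
def Claim_equal_find_hack : Prop := ∀ (arr : List (String × Int × String)), Dom_find_hack arr → Spec_find_hack arr (find_hack arr)

-- ===== LEMMAS AND PROOFS =====

-- proof-only helper: A's per-record score, factored out of find_hack's loop body
def pvAScore (s : String) : Int :=
  let st : Int × Int × Bool := s.toList.foldl (fun st letter =>
    if pvDictLetter.contains letter then
      let sum1 := st.1 + pvDictLetter.getD letter 0
      if letter = 'A' ∨ letter = 'B' then (sum1, st.2.1 + 1, st.2.2)
      else (sum1, st.2.1, false)
    else st) (0, 0, true)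
  let sum1 := if st.2.1 > 4 ∧ st.2.2 = true then st.1 + 20 else st.1
  if sum1 > 200 then (200 : Int) else sum1

theorem find_hack_eq (arr : List (String × Int × String)) :
    find_hack arr = arr.foldl (fun acc n =>
      if n.2.1 ≠ pvAScore n.2.2 then acc ++ [n.1] else acc) [] := rfl

-- one step of A's inner character loop, evaluated
theorem stepA_eval (st : Int × Int × Bool) (ch : Char) :
    (if pvDictLetter.contains ch then
      let sum1 := st.1 + pvDictLetter.getD ch 0
      if ch = 'A' ∨ ch = 'B' then (sum1, st.2.1 + 1, st.2.2)
      else (sum1, st.2.1, false)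
    else st)
    = (st.1 + (if ch = 'A' then 30 else if ch = 'B' then 20 else if ch = 'C' then 10 else if ch = 'D' then 5 else 0),
       st.2.1 + (if ch = 'A' ∨ ch = 'B' then 1 else 0),
       st.2.2 && !(ch = 'C' ∨ ch = 'D')) := by
  by_cases hA : ch = 'A'
  · subst hA
    simp [show pvDictLetter.contains 'A' = true from by decide,
          show pvDictLetter.getD 'A' 0 = 30 from by decide]
  by_cases hB : ch = 'B'
  · subst hB
    simp [show pvDictLetter.contains 'B' = true from by decide,
          show pvDictLetter.getD 'B' 0 = 20 from by decide]
  by_cases hC : ch = 'C'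
  · subst hC
    simp [show pvDictLetter.contains 'C' = true from by decide,
          show pvDictLetter.getD 'C' 0 = 10 from by decide]
  by_cases hD : ch = 'D'
  · subst hD
    simp [show pvDictLetter.contains 'D' = true from by decide,
          show pvDictLetter.getD 'D' 0 = 5 from by decide]
  · have hcon : pvDictLetter.contains ch = false := by
      rw [PySem.Dict.contains_eq_decide_mem_keys]
      simp [show pvDictLetter.keys = ['A', 'B', 'C', 'D'] from by decide, hA, hB, hC, hD]
    simp [hcon, hA, hB, hC, hD]

-- A's inner loop, characterised by letter counts
theorem find_hack_inner (cs : List Char) (s k : Int) (f : Bool) :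
    cs.foldl (fun (st : Int × Int × Bool) letter =>
      if pvDictLetter.contains letter then
        let sum1 := st.1 + pvDictLetter.getD letter 0
        if letter = 'A' ∨ letter = 'B' then (sum1, st.2.1 + 1, st.2.2)
        else (sum1, st.2.1, false)
      else st) (s, k, f)
    = (s + 30 * cs.count 'A' + 20 * cs.count 'B' + 10 * cs.count 'C' + 5 * cs.count 'D',
       k + cs.count 'A' + cs.count 'B',
       f && (cs.count 'C' + cs.count 'D' == 0)) := by
  induction cs generalizing s k f with
  | nil => simp
  | cons ch cs ih =>
    rw [List.foldl_cons, stepA_eval, ih]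
    refine Prod.ext ?_ (Prod.ext ?_ ?_)
    · simp only [List.count_cons]
      by_cases hA : ch = 'A' <;> by_cases hB : ch = 'B' <;>
        by_cases hC : ch = 'C' <;> by_cases hD : ch = 'D' <;>
      simp [hA, hB, hC, hD] <;> omega
    · simp only [List.count_cons]
      by_cases hA : ch = 'A' <;> by_cases hB : ch = 'B' <;>
      simp [hA, hB] <;> omega
    · simp only [List.count_cons]
      by_cases hC : ch = 'C' <;> by_cases hD : ch = 'D' <;>
        cases f <;> simp [hC, hD, Nat.add_comm, Nat.add_left_comm]

-- str.count with a single-character needle is the character count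
theorem count_go_single (c : Char) (l : List Char) (fuel acc : Nat) (h : l.length ≤ fuel) :
    PySem.Chars.count.go [c] fuel l acc = acc + l.count c := by
  induction l generalizing fuel acc with
  | nil => cases fuel <;> simp [PySem.Chars.count.go]
  | cons ch t ih =>
    cases fuel with
    | zero => simp at h
    | succ fuel =>
      rw [PySem.Chars.count.go]
      by_cases hc : ch = c
      · subst hc
        simp only [List.isPrefixOf, List.length, beq_self_eq_true, Bool.true_and,
          List.isPrefixOf_nil_left, if_true, List.drop_succ_cons, List.drop_zero]
        rw [ih fuel (acc + 1) (by simpa using Nat.lt_succ_iff.mp (by simpa using h))]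
        simp [List.count_cons]; omega
      · have : ([c].isPrefixOf (ch :: t)) = false := by
          simp only [List.isPrefixOf, Bool.and_eq_false_iff, beq_eq_false_iff_ne]
          exact Or.inl (fun h' => hc h'.symm)
        rw [this]
        simp only [Bool.false_eq_true, if_false]
        rw [ih fuel acc (Nat.lt_succ_iff.mp (by simpa using h))]
        simp [List.count_cons, hc]

theorem str_count_single (s : String) (c : Char) (sub : String) (hs : sub.toList = [c]) :
    PySem.Str.count s sub = s.toList.count c := by
  simp only [PySem.Str.count, hs, PySem.Chars.count]
  simp only [List.isEmpty_cons, Bool.false_eq_true, if_false]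
  rw [count_go_single c s.toList s.toList.length 0 le_rfl]
  simp

-- per-record: A's computed score equals B's pvGrade
theorem score_agree (s : String) : pvAScore s = pvGrade s := by
  unfold pvAScore pvGrade
  rw [find_hack_inner]
  have hA : PySem.Str.count s "A" = s.toList.count 'A' := str_count_single s 'A' "A" (by decide)
  have hB : PySem.Str.count s "B" = s.toList.count 'B' := str_count_single s 'B' "B" (by decide)
  have hC : PySem.Str.count s "C" = s.toList.count 'C' := str_count_single s 'C' "C" (by decide)
  have hD : PySem.Str.count s "D" = s.toList.count 'D' := str_count_single s 'D' "D" (by decide)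
  simp only [hA, hB, hC, hD, zero_add, Bool.true_and]
  by_cases hcd : s.toList.count 'C' + s.toList.count 'D' = 0
  · have h3 : ((s.toList.count 'C' + s.toList.count 'D' == 0)) = true := by
      simpa using hcd
    rw [h3]
    simp only [and_true]
    have : (s.toList.count 'C' : Int) + (s.toList.count 'D' : Int) = 0 := by exact_mod_cast hcd
    split_ifs <;> omega
  · have h3 : (s.toList.count 'C' + s.toList.count 'D' == 0) = false := by
      rw [beq_eq_false_iff_ne]; exact hcd
    rw [h3]
    have : (s.toList.count 'C' : Int) + (s.toList.count 'D' : Int) ≠ 0 := by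
      intro h; apply hcd; exact_mod_cast h
    simp only [Bool.false_eq_true, and_false, if_false]
    split_ifs <;> omega

-- ===== VERDICT (by name: the statement is the Claim_ definition above) =====
theorem find_hack_spec : Claim_equal_find_hack := by
  intro arr _
  unfold Spec_find_hack find_hack_alt
  rw [find_hack_eq]
  simp only [score_agree]
  rw [show (fun acc (n : String × Int × String) => if n.2.1 ≠ pvGrade n.2.2 then acc ++ [n.1] else acc)
       = (fun acc n => if (decide (n.2.1 ≠ pvGrade n.2.2)) = true then acc ++ [n.1] else acc) from by
         funext acc n; split_ifs with h1 h2 <;> simp_all]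
  rw [PySem.List.foldl_append_if (fun n => decide (n.2.1 ≠ pvGrade n.2.2)) (·.1) arr []]
  simp
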